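-- pv_equiv track=rewrite | github.com/weshofmann/tyler-restaurant-csv | find-businesses.py | prioritize_emails
-- ===== SOURCE A (Python) =====
-- def prioritize_emails(email_list):
--     """
--     Sorts a list of email addresses, prioritizing those likely to be good points of contact.
--
--     Parameters:
--         email_list (list): A list of email addresses (strings).
--
--     Returns:
--         list: A new list with emails sorted to prioritize business contact addresses.
--     """
--     # List of prefixes that are likely good points of contact
--     priority_prefixes = [
--         'sales', 'info', 'questions', 'contact', 'support', 'hello',
--         'inquiries', 'business', 'admin', 'office', 'general', 'customerservice',
--         'enquiries', 'service', 'team', 'marketing', 'press', 'partnerships',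
--         'help', 'career', 'jobs', 'inquiry', 'media', 'hr', 'recruitment',
--         'feedback', 'legal', 'enquiry', 'request', 'advertising', 'affiliates',
--         'billing', 'donations', 'volunteer', 'webmaster', 'newsletter', 'pr',
--         'services', 'order', 'orders', 'purchasing', 'management', 'info-en',
--         'customercare', 'customerrelations', 'crm', 'customer-service', 'cs',
--         'supportteam', 'helpdesk', 'assistance'
--     ]
--
--     # Normalize priority prefixes for case-insensitive comparison
--     priority_prefixes = set(prefix.lower() for prefix in priority_prefixes)
--
--     def get_prefix(email):
--         # Extract the local part before the '@' symbol and convert to lowercase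
--         return email.split('@')[0].lower()
--
--     # Sort the emails
--     sorted_emails = sorted(
--         email_list,
--         key=lambda email: (get_prefix(email) not in priority_prefixes, email)
--     )
--
--     return sorted_emails
-- ===== SOURCE B (Python) =====
-- def prioritize_emails(email_list):
--     """
--     Sorts a list of email addresses, prioritizing those likely to be good points of contact.
--
--     Parameters:
--         email_list (list): A list of email addresses (strings).
--
--     Returns:
--         list: A new list with emails sorted to prioritize business contact addresses.
--     """
--     # Prefixes likely to be good points of contact (already lowercase)
--     priority_prefixes = set(
--         "sales info questions contact support hello "
--         "inquiries business admin office general customerservice "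
--         "enquiries service team marketing press partnerships "
--         "help career jobs inquiry media hr recruitment "
--         "feedback legal enquiry request advertising affiliates "
--         "billing donations volunteer webmaster newsletter pr "
--         "services order orders purchasing management info-en "
--         "customercare customerrelations crm customer-service cs "
--         "supportteam helpdesk assistance".split()
--     )
--
--     def is_priority(email):
--         return email.split('@')[0].lower() in priority_prefixes
--
--     # Sort once by the email string, then stably pick the priority ones first.
--     ordered = sorted(email_list)
--     return [e for e in ordered if is_priority(e)] + [e for e in ordered if not is_priority(e)]
-- ===== Notes on version B (the rewrite author's own statement) =====
-- stated objective: alternative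
-- what changed: Replaces the single sort under a (not-priority, email) tuple key by one plain sort of the whole list followed by a stable two-filter partition (priority emails first), with the prefix set built by splitting one whitespace-separated string.
import Mathlib
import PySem

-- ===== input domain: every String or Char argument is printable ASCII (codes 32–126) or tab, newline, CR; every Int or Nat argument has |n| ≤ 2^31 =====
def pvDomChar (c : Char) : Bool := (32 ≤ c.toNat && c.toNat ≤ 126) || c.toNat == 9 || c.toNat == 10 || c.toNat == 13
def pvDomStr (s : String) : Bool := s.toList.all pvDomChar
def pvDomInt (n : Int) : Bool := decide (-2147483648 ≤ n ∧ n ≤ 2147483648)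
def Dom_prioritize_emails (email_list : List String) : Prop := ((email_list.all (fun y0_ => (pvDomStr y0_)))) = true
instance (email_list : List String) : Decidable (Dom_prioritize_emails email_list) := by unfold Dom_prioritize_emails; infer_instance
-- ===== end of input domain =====

set_option maxRecDepth 100000
set_option maxHeartbeats 1000000

-- B replaces A's single sort under a (not-priority, email) tuple key by one plain sort of the
-- whole list followed by a stable two-filter partition; same results, a different decomposition
-- (objective: alternative).

-- ===== PORT A =====
-- A's priority_prefixes list literal
def pvPriorityPrefixesA : List String :=
  ["sales", "info", "questions", "contact", "support", "hello",
   "inquiries", "business", "admin", "office", "general", "customerservice",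
   "enquiries", "service", "team", "marketing", "press", "partnerships",
   "help", "career", "jobs", "inquiry", "media", "hr", "recruitment",
   "feedback", "legal", "enquiry", "request", "advertising", "affiliates",
   "billing", "donations", "volunteer", "webmaster", "newsletter", "pr",
   "services", "order", "orders", "purchasing", "management", "info-en",
   "customercare", "customerrelations", "crm", "customer-service", "cs",
   "supportteam", "helpdesk", "assistance"]

-- set(prefix.lower() for prefix in priority_prefixes)
def pvPrioritySetA : PySem.Set String := PySem.Set.ofList (pvPriorityPrefixesA.map PySem.Str.lower)

-- get_prefix: email.split('@')[0].lower().  '@' ≠ '' so split? is always some, and Python's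
-- split never returns an empty list, so [0] is its head — both getD/headD defaults are dead.
def pvGetPrefixA (email : String) : String :=
  PySem.Str.lower (((PySem.Str.split? email "@").getD []).headD "")

-- sorted(email_list, key=lambda email: (get_prefix(email) not in priority_prefixes, email))
def prioritize_emails (email_list : List String) : List String :=
  PySem.List.sorted2 email_list
    (fun email => !(PySem.Set.contains pvPrioritySetA (pvGetPrefixA email)))
    (fun email => email)

-- ===== PORT B =====
-- set("sales info … assistance".split())
def pvPrioritySetB : PySem.Set String :=
  PySem.Set.ofList (PySem.Str.split₀
    ("sales info questions contact support hello " ++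
     "inquiries business admin office general customerservice " ++
     "enquiries service team marketing press partnerships " ++
     "help career jobs inquiry media hr recruitment " ++
     "feedback legal enquiry request advertising affiliates " ++
     "billing donations volunteer webmaster newsletter pr " ++
     "services order orders purchasing management info-en " ++
     "customercare customerrelations crm customer-service cs " ++
     "supportteam helpdesk assistance"))

-- is_priority: email.split('@')[0].lower() in priority_prefixes (same split note as in port A)
def pvIsPriorityB (email : String) : Bool :=
  PySem.Set.contains pvPrioritySetB
    (PySem.Str.lower (((PySem.Str.split? email "@").getD []).headD ""))

-- ordered = sorted(email_list); the two comprehensions over it, concatenated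
def prioritize_emails_alt (email_list : List String) : List String :=
  (PySem.List.sorted email_list (fun e => e)).filter (fun e => pvIsPriorityB e) ++
  (PySem.List.sorted email_list (fun e => e)).filter (fun e => !pvIsPriorityB e)

-- ===== PRECONDITION & SPEC =====
def Spec_prioritize_emails (email_list : List String) (out : List String) : Prop := out = prioritize_emails_alt email_list
instance (email_list : List String) (out : List String) : Decidable (Spec_prioritize_emails email_list out) := by unfold Spec_prioritize_emails; infer_instance

-- ===== CLAIM (what is proved, stated in full; the proofs are below) =====
def Claim_equal_prioritize_emails : Prop := ∀ (email_list : List String), Dom_prioritize_emails email_list → Spec_prioritize_emails email_list (prioritize_emails email_list)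

-- ===== LEMMAS AND PROOFS =====

-- A's lowered prefix set equals B's split-built set (same distinct strings, same order)
set_option maxRecDepth 100000 in
set_option maxHeartbeats 2000000 in
theorem pvPrefixes_eq : pvPrioritySetA = pvPrioritySetB := by decide

-- the lexicographic key A sorts under, phrased with B's membership test
def pvKey (e : String) : Lex (Bool × String) := toLex (!pvIsPriorityB e, e)

theorem pvKey_injective : Function.Injective pvKey := by
  intro a b h
  exact congrArg (fun x => (ofLex x).2) h

set_option maxRecDepth 100000 in
theorem pvPredA_eq (email : String) :
    (!(PySem.Set.contains pvPrioritySetA (pvGetPrefixA email))) = !pvIsPriorityB email := by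
  rw [pvGetPrefixA, pvPrefixes_eq]
  simp only [pvIsPriorityB]

theorem pvLt_eq (a b : String) :
    (decide ((!pvIsPriorityB a) < (!pvIsPriorityB b)) ||
      !decide ((!pvIsPriorityB b) < (!pvIsPriorityB a)) && decide (a < b)) =
    decide (pvKey a < pvKey b) := by
  cases h1 : pvIsPriorityB a <;> cases h2 : pvIsPriorityB b <;>
    simp [pvKey, h1, h2, Prod.Lex.lt_iff]

theorem pvInsertBy_congr {f g : String → String → Bool} (h : ∀ a b, f a b = g a b)
    (x : String) (ys : List String) :
    PySem.List.insertBy f x ys = PySem.List.insertBy g x ys := by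
  induction ys with
  | nil => rfl
  | cons y ys ih => simp only [PySem.List.insertBy, h, ih]

-- A's sorted2 under the tuple key is a sort under the single lexicographic key pvKey
theorem pvPortA_eq_sorted_key (xs : List String) :
    prioritize_emails xs = PySem.List.sorted xs pvKey := by
  unfold prioritize_emails PySem.List.sorted2 PySem.List.sorted
  simp only [pvPredA_eq]
  apply PySem.List.foldl_congr_mem
  intro acc x _
  exact pvInsertBy_congr (fun a b => pvLt_eq a b) x acc

theorem pvAlt_perm (xs : List String) : (prioritize_emails_alt xs).Perm xs := by
  unfold prioritize_emails_alt
  exact (List.filter_append_perm _ _).trans (PySem.List.sorted_perm xs (fun e => e) false)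

set_option maxHeartbeats 1000000 in
theorem pvAlt_pairwise (xs : List String) :
    List.Pairwise (fun a b => pvKey a ≤ pvKey b) (prioritize_emails_alt xs) := by
  unfold prioritize_emails_alt
  rw [List.pairwise_append]
  have hsorted := PySem.List.sorted_pairwise xs (fun e => e)
  refine ⟨?_, ?_, ?_⟩
  · refine ((hsorted.filter _).imp_of_mem ?_)
    intro a b ha hb hab
    have ha' := (List.mem_filter.mp ha).2
    have hb' := (List.mem_filter.mp hb).2
    simp only [pvKey, Prod.Lex.toLex_le_toLex, ha', hb']
    exact Or.inr ⟨by trivial, hab⟩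
  · refine ((hsorted.filter _).imp_of_mem ?_)
    intro a b ha hb hab
    have ha' := (List.mem_filter.mp ha).2
    have hb' := (List.mem_filter.mp hb).2
    simp only [Bool.not_eq_eq_eq_not, Bool.not_true] at ha' hb'
    simp only [pvKey, Prod.Lex.toLex_le_toLex, ha', hb']
    exact Or.inr ⟨by trivial, hab⟩
  · intro a ha b hb
    have ha' := (List.mem_filter.mp ha).2
    have hb' := (List.mem_filter.mp hb).2
    simp only [Bool.not_eq_eq_eq_not, Bool.not_true] at hb'
    refine le_of_lt ?_
    simp only [pvKey, Prod.Lex.toLex_lt_toLex, ha', hb']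
    exact Or.inl (by decide)

-- ===== VERDICT (by name: the statement is the Claim_ definition above) =====
set_option maxHeartbeats 1000000 in
theorem prioritize_emails_spec : Claim_equal_prioritize_emails := by
  intro xs _
  unfold Spec_prioritize_emails
  rw [pvPortA_eq_sorted_key]
  exact PySem.List.eq_of_perm_of_pairwise_le_of_injective pvKey pvKey_injective
    ((PySem.List.sorted_perm xs pvKey false).trans (pvAlt_perm xs).symm)
    (PySem.List.sorted_pairwise xs pvKey)
    (pvAlt_pairwise xs)
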